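-- pv_equiv track=rewrite | github.com/kaestro/algorithm-study | January/Leetcode Daily Challenge/0126 Path With Minimum Effort.py | isPassable
-- ===== SOURCE A (Python) =====
-- from collections import deque
--
-- def isPassable(heights:list, k:int) -> bool:
--     R, C = len(heights), len(heights[0])
--     check = [[False for i in range(C)] for j in range(R)]
--     check[0][0] = True
--     q = deque()
--     q.append((0,0)) # row, col
--
--     dRow = [1,-1,0,0]
--     dCol = [0,0,1,-1]
--
--     while len(q) > 0:
--         temp = q.popleft()
--         r, c = temp[0], temp[1]
--         if r == R-1 and c == C-1:
--             return True
--         for d in range(4):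
--             newR = r + dRow[d]
--             newC = c + dCol[d]
--             if newR < 0 or newC < 0 or newR >= R or newC >= C:
--                 continue
--             if check[newR][newC] or abs(heights[newR][newC]-heights[r][c]) > k:
--                 continue
--             check[newR][newC] = True
--             q.append((newR, newC))
--     return False
-- ===== SOURCE B (Python) =====
-- def isPassable(heights: list, k: int) -> bool:
--     R, C = len(heights), len(heights[0])
--     reach = {(0, 0)}
--     changed = True
--     while changed:
--         changed = False
--         for r in range(R):
--             for c in range(C):
--                 if (r, c) not in reach and any(
--                         (nr, nc) in reach and abs(heights[r][c] - heights[nr][nc]) <= k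
--                         for nr, nc in ((r - 1, c), (r + 1, c), (r, c - 1), (r, c + 1))):
--                     reach.add((r, c))
--                     changed = True
--     return (R - 1, C - 1) in reach
-- ===== Notes on version B (the rewrite author's own statement) =====
-- stated objective: alternative
-- what changed: A's BFS with a deque and a per-cell visited matrix is replaced by round-based saturation: a set of reachable cells is grown by full-grid sweeps until a fixpoint, then the target's membership is returned (no queue, no early exit).
-- outside the precondition, e.g. on isPassable([[0, 5], [9]], 0): A returns False, B returns False
import Mathlib
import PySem

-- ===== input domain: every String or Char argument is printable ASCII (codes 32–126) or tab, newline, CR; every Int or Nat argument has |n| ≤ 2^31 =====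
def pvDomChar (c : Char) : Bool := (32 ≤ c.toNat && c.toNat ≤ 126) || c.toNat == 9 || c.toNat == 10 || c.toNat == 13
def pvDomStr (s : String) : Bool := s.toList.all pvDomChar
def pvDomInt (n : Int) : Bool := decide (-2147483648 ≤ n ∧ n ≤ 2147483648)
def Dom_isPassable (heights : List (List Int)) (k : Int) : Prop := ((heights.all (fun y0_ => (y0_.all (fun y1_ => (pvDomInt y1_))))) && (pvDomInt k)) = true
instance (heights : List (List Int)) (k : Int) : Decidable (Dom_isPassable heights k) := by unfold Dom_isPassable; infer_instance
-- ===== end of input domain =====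

-- B replaces A's BFS (deque + visited matrix) by round-based saturation of a reachable-cell
-- set to a fixpoint (objective: alternative algorithm; not claimed faster).

-- ===== PORT A =====
-- total indexers: the getD defaults only make out-of-range access total; under Pre_ every
-- access is in bounds, where they are exactly Python's heights[r][c] / check[r][c]
def getH (heights : List (List Int)) (r c : Int) : Int :=
  (heights.getD r.toNat []).getD c.toNat 0

def getB (check : List (List Bool)) (r c : Int) : Bool :=
  (check.getD r.toNat []).getD c.toNat false

def setB (check : List (List Bool)) (r c : Int) : List (List Bool) :=
  check.set r.toNat ((check.getD r.toNat []).set c.toNat true)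

-- totality guard for the termination measure; always true on states the run reaches
def inDims (check : List (List Bool)) (r c : Int) : Bool :=
  decide (r.toNat < check.length) && decide (c.toNat < (check.getD r.toNat []).length)

def countFalse (check : List (List Bool)) : Nat :=
  (check.map (fun row => row.count false)).sum

-- dRow/dCol of A, zipped in order
def dirs : List (Int × Int) := [(1, 0), (-1, 0), (0, 1), (0, -1)]

-- body of A's 'for d in range(4)' loop
def relax (heights : List (List Int)) (R C k r c : Int)
    (st : List (List Bool) × List (Int × Int)) (d : Int × Int) :
    List (List Bool) × List (Int × Int) :=
  if r + d.1 < 0 ∨ c + d.2 < 0 ∨ R ≤ r + d.1 ∨ C ≤ c + d.2 then st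
  else if getB st.1 (r + d.1) (c + d.2)
      || decide (k < |getH heights (r + d.1) (c + d.2) - getH heights r c|) then st
  else if inDims st.1 (r + d.1) (c + d.2) then
    (setB st.1 (r + d.1) (c + d.2), st.2 ++ [(r + d.1, c + d.2)]) else st

-- A's 'while len(q) > 0' loop; the fuel argument is a pure totality guard: each
-- iteration strictly decreases countFalse check + q.length, and isPassable hands the
-- loop more fuel than that, so the fuel-exhausted branch is never taken
def bfsLoop (heights : List (List Int)) (R C k : Int) :
    Nat → List (List Bool) → List (Int × Int) → Bool
  | 0, _, _ => false
  | _ + 1, _, [] => false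
  | fuel + 1, check, p :: rest =>
    if p.1 = R - 1 ∧ p.2 = C - 1 then true
    else
      bfsLoop heights R C k fuel
        (dirs.foldl (relax heights R C k p.1 p.2) (check, rest)).1
        (dirs.foldl (relax heights R C k p.1 p.2) (check, rest)).2

def isPassable (heights : List (List Int)) (k : Int) : Bool :=
  bfsLoop heights (heights.length : Int) ((heights.getD 0 []).length : Int) k
    (countFalse (setB (List.replicate heights.length
      (List.replicate (heights.getD 0 []).length false)) 0 0) + 2)
    (setB (List.replicate heights.length
      (List.replicate (heights.getD 0 []).length false)) 0 0)
    [((0 : Int), (0 : Int))]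

-- ===== PORT B =====
-- the four neighbor cells, in Source B's order
def nbrs (r c : Int) : List (Int × Int) := [(r - 1, c), (r + 1, c), (r, c - 1), (r, c + 1)]

-- body of B's inner 'for c in range(C)' loop
def sweepCell (heights : List (List Int)) (k : Int)
    (st : PySem.Set (Int × Int) × Bool) (r c : Int) : PySem.Set (Int × Int) × Bool :=
  if (!(PySem.Set.contains st.1 (r, c))) &&
      (nbrs r c).any (fun p =>
        PySem.Set.contains st.1 p && decide (|getH heights r c - getH heights p.1 p.2| ≤ k))
  then (PySem.Set.add st.1 (r, c), true) else st

def sweepRow (heights : List (List Int)) (k C : Int)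
    (st : PySem.Set (Int × Int) × Bool) (r : Int) : PySem.Set (Int × Int) × Bool :=
  (PySem.List.pyRange 0 C 1).foldl (fun st c => sweepCell heights k st r c) st

-- one full pass of B's 'for r … for c …' with changed initialised to False
def sweep (heights : List (List Int)) (k R C : Int)
    (reach : PySem.Set (Int × Int)) : PySem.Set (Int × Int) × Bool :=
  (PySem.List.pyRange 0 R 1).foldl (sweepRow heights k C) (reach, false)

-- grid cell universe and the sweep progress measure (used by the proofs below)
def allCells (R C : Int) : List (Int × Int) :=
  (PySem.List.pyRange 0 R 1).flatMap (fun r => (PySem.List.pyRange 0 C 1).map (fun c => (r, c)))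

def missing (R C : Int) (reach : PySem.Set (Int × Int)) : Nat :=
  (allCells R C).countP (fun p => ! PySem.Set.contains reach p)

-- B's 'while changed' loop (runs at least once, like the Python's changed = True entry);
-- the fuel is a pure totality guard: a sweep that reports a change strictly decreases
-- missing R C reach (sweep_measure), and isPassable_alt hands the loop more fuel than
-- that, so the fuel-exhausted branch is never taken
def fixLoop (heights : List (List Int)) (k R C : Int) :
    Nat → PySem.Set (Int × Int) → PySem.Set (Int × Int)
  | 0, reach => reach
  | fuel + 1, reach =>
    if (sweep heights k R C reach).2 = true then
      fixLoop heights k R C fuel (sweep heights k R C reach).1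
    else (sweep heights k R C reach).1

def isPassable_alt (heights : List (List Int)) (k : Int) : Bool :=
  PySem.Set.contains
    (fixLoop heights k (heights.length : Int) ((heights.getD 0 []).length : Int)
      (missing (heights.length : Int) ((heights.getD 0 []).length : Int)
        (PySem.Set.ofList [((0 : Int), (0 : Int))]) + 1)
      (PySem.Set.ofList [((0 : Int), (0 : Int))]))
    ((heights.length : Int) - 1, ((heights.getD 0 []).length : Int) - 1)

-- ===== PRECONDITION & SPEC =====
-- Pre_ requires a nonempty grid, a nonempty first row, and no row shorter than the first
-- (only columns < len(heights[0]) are ever indexed): A raises IndexError on heights = [],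
-- on zero-column grids, and on grids with a short row whenever the search touches a
-- missing cell; on some short-row grids A still returns (see the claim's cite) but that
-- value depends on which cells the search happens to touch, so no value is claimed there.
def Pre_isPassable (heights : List (List Int)) (k : Int) : Prop :=
  heights ≠ [] ∧ heights.getD 0 [] ≠ [] ∧
  ∀ row ∈ heights, (heights.getD 0 []).length ≤ row.length

instance (heights : List (List Int)) (k : Int) : Decidable (Pre_isPassable heights k) := by
  unfold Pre_isPassable; infer_instance

def pvWitness_isPassable : List (List Int) × Int := ([[1, 2], [3, 4]], 1)

def Spec_isPassable (heights : List (List Int)) (k : Int) (out : Bool) : Prop :=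
  out = isPassable_alt heights k

instance (heights : List (List Int)) (k : Int) (out : Bool) :
    Decidable (Spec_isPassable heights k out) := by
  unfold Spec_isPassable; infer_instance

-- ===== CLAIM (what is proved, stated in full; the proofs are below) =====
def Claim_equal_isPassable : Prop := ∀ (heights : List (List Int)) (k : Int),
  Dom_isPassable heights k → Pre_isPassable heights k →
  Spec_isPassable heights k (isPassable heights k)

-- ===== LEMMAS AND PROOFS =====

-- measure lemmas for A's BFS loop: each iteration consumes one unit of
-- countFalse check + q.length, so the fuel isPassable supplies is enough
lemma count_set_true (row : List Bool) (j : Nat) (hj : j < row.length)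
    (hf : row.getD j false = false) :
    (row.set j true).count false + 1 = row.count false := by
  induction row generalizing j with
  | nil => simp at hj
  | cons a t ih =>
    cases j with
    | zero => simp_all
    | succ j =>
      simp only [List.set_cons_succ, List.count_cons, List.getD_cons_succ,
        List.length_cons] at *
      have := ih j (by omega) hf
      omega

lemma sum_map_set (check : List (List Bool)) (i : Nat) (row : List Bool)
    (hi : i < check.length) :
    countFalse (check.set i row) + (check.getD i []).count false
      = countFalse check + row.count false := by
  induction check generalizing i with
  | nil => simp at hi
  | cons a t ih =>
    cases i with
    | zero => simp [countFalse]; omega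
    | succ i =>
      simp only [List.set_cons_succ, countFalse, List.map_cons, List.sum_cons,
        List.getD_cons_succ, List.length_cons] at *
      have := ih i (by omega)
      omega

lemma countFalse_setB (check : List (List Bool)) (r c : Int)
    (h : inDims check r c = true) (hf : getB check r c = false) :
    countFalse (setB check r c) + 1 = countFalse check := by
  simp only [inDims, Bool.and_eq_true, decide_eq_true_eq] at h
  have h2 := count_set_true (check.getD r.toNat []) c.toNat h.2 hf
  have h1 := sum_map_set check r.toNat ((check.getD r.toNat []).set c.toNat true) h.1
  simp only [setB]
  omega

lemma relax_measure (heights : List (List Int)) (R C k r c : Int)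
    (st : List (List Bool) × List (Int × Int)) (d : Int × Int) :
    countFalse (relax heights R C k r c st d).1 + (relax heights R C k r c st d).2.length
      = countFalse st.1 + st.2.length := by
  unfold relax
  split_ifs with h1 h2 h3
  · rfl
  · rfl
  · have hf : getB st.1 (r + d.1) (c + d.2) = false := by
      by_contra hc
      simp [eq_true_of_ne_false hc] at h2
    have := countFalse_setB st.1 (r + d.1) (c + d.2) h3 hf
    simp only [List.length_append, List.length_cons, List.length_nil]
    omega
  · rfl

lemma foldl_relax_measure (heights : List (List Int)) (R C k r c : Int)
    (ds : List (Int × Int)) :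
    ∀ st, countFalse (ds.foldl (relax heights R C k r c) st).1
        + (ds.foldl (relax heights R C k r c) st).2.length
      = countFalse st.1 + st.2.length := by
  induction ds with
  | nil => intro st; rfl
  | cons d t ih =>
    intro st
    simp only [List.foldl_cons]
    rw [ih (relax heights R C k r c st d), relax_measure]

lemma countP_lt {α : Type} (l : List α) (p q : α → Bool) (a : α) (ha : a ∈ l)
    (hpa : p a = true) (hqa : q a = false) (himp : ∀ x ∈ l, q x = true → p x = true) :
    l.countP q < l.countP p := by
  induction l with
  | nil => simp at ha
  | cons b t ih =>
    rcases List.mem_cons.1 ha with rfl | hb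
    · have h1 : t.countP q ≤ t.countP p :=
        List.countP_mono_left (fun x hx => himp x (by simp [hx]))
      simp [hpa, hqa]
      omega
    · have := ih hb (fun x hx => himp x (by simp [hx]))
      have h2 : (if q b then 1 else 0) ≤ (if p b then 1 else 0) := by
        by_cases hq : q b = true
        · simp [hq, himp b (by simp)]
        · simp [Bool.eq_false_iff.2 hq]
      simp only [List.countP_cons]
      split_ifs at h2 ⊢ <;> omega

lemma foldl_rel {α β : Type} (Rel : β → β → Prop)
    (hrefl : ∀ s, Rel s s) (htrans : ∀ a b c, Rel a b → Rel b c → Rel a c)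
    (f : β → α → β) (l : List α) (hstep : ∀ s a, a ∈ l → Rel s (f s a)) :
    ∀ st, Rel st (l.foldl f st) := by
  induction l with
  | nil => simpa using hrefl
  | cons a t ih =>
    intro st
    exact htrans _ _ _ (hstep st a (by simp))
      (ih (fun s b hb => hstep s b (by simp [hb])) _)

def SRel (R C : Int) (s s' : PySem.Set (Int × Int) × Bool) : Prop :=
  (∀ x ∈ s.1, x ∈ s'.1) ∧ (s.2 = true → s'.2 = true) ∧
  (s'.2 = true → s.2 = true ∨ missing R C s'.1 < missing R C s.1)

lemma srel_refl (R C : Int) (s : PySem.Set (Int × Int) × Bool) : SRel R C s s :=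
  ⟨fun _ h => h, fun h => h, fun h => Or.inl h⟩

lemma missing_mono (R C : Int) (s t : PySem.Set (Int × Int))
    (h : ∀ x ∈ s, x ∈ t) : missing R C t ≤ missing R C s := by
  apply List.countP_mono_left
  intro x _ hx
  simp only [Bool.not_eq_eq_eq_not, Bool.not_true] at hx ⊢
  rw [← Bool.not_eq_true] at hx ⊢
  intro hmem
  exact hx ((PySem.Set.contains_iff _ _).2 (h x ((PySem.Set.contains_iff _ _).1 hmem)))

lemma srel_trans (R C : Int) (a b c : PySem.Set (Int × Int) × Bool)
    (h1 : SRel R C a b) (h2 : SRel R C b c) : SRel R C a c := by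
  obtain ⟨m1, c1, d1⟩ := h1
  obtain ⟨m2, c2, d2⟩ := h2
  refine ⟨fun x hx => m2 x (m1 x hx), fun h => c2 (c1 h), fun h => ?_⟩
  have hcb : missing R C c.1 ≤ missing R C b.1 := missing_mono R C b.1 c.1 m2
  have hba : missing R C b.1 ≤ missing R C a.1 := missing_mono R C a.1 b.1 m1
  rcases d2 h with hb | hlt
  · rcases d1 hb with ha | hlt1
    · exact Or.inl ha
    · exact Or.inr (by omega)
  · exact Or.inr (by omega)

lemma mem_allCells (R C : Int) (p : Int × Int) :
    p ∈ allCells R C ↔ (0 ≤ p.1 ∧ p.1 < R ∧ 0 ≤ p.2 ∧ p.2 < C) := by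
  constructor
  · intro h
    obtain ⟨r, hr, h2⟩ := List.mem_flatMap.1 h
    obtain ⟨c, hc, rfl⟩ := List.mem_map.1 h2
    obtain ⟨hr1, hr2⟩ := (PySem.List.mem_pyRange_one).1 hr
    obtain ⟨hc1, hc2⟩ := (PySem.List.mem_pyRange_one).1 hc
    exact ⟨hr1, hr2, hc1, hc2⟩
  · intro ⟨h1, h2, h3, h4⟩
    refine List.mem_flatMap.2 ⟨p.1, (PySem.List.mem_pyRange_one).2 ⟨h1, h2⟩, ?_⟩
    exact List.mem_map.2 ⟨p.2, (PySem.List.mem_pyRange_one).2 ⟨h3, h4⟩, rfl⟩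

lemma srel_cell (heights : List (List Int)) (k R C : Int)
    (s : PySem.Set (Int × Int) × Bool) (r c : Int)
    (hr : 0 ≤ r ∧ r < R) (hc : 0 ≤ c ∧ c < C) :
    SRel R C s (sweepCell heights k s r c) := by
  unfold sweepCell
  split_ifs with hcond
  · simp only [Bool.and_eq_true, Bool.not_eq_eq_eq_not, Bool.not_true] at hcond
    refine ⟨fun x hx => ?_, fun _ => rfl, fun _ => Or.inr ?_⟩
    · exact (PySem.Set.mem_add _ _ _).2 (Or.inl hx)
    · apply countP_lt (allCells R C)
        (fun x => ! PySem.Set.contains s.1 x)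
        (fun x => ! PySem.Set.contains (PySem.Set.add s.1 (r, c)) x) (r, c)
      · exact (mem_allCells R C (r, c)).2 ⟨hr.1, hr.2, hc.1, hc.2⟩
      · rw [Bool.not_eq_true']; exact hcond.1
      · have hmem : (r, c) ∈ PySem.Set.add s.1 (r, c) :=
          (PySem.Set.mem_add _ _ _).2 (Or.inr rfl)
        simp
      · intro x _ hx
        simp only [Bool.not_eq_eq_eq_not, Bool.not_true] at hx ⊢
        rw [← Bool.not_eq_true] at hx ⊢
        intro hmem
        exact hx ((PySem.Set.contains_iff _ _).2
          ((PySem.Set.mem_add _ _ _).2 (Or.inl ((PySem.Set.contains_iff _ _).1 hmem))))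
  · exact srel_refl R C s

lemma sweep_measure (heights : List (List Int)) (k R C : Int)
    (reach : PySem.Set (Int × Int))
    (h : (sweep heights k R C reach).2 = true) :
    missing R C (sweep heights k R C reach).1 < missing R C reach := by
  have hrel : SRel R C (reach, false) (sweep heights k R C reach) := by
    apply foldl_rel (SRel R C) (srel_refl R C) (srel_trans R C)
    intro s r hrmem
    have hr := (PySem.List.mem_pyRange_one).1 hrmem
    apply foldl_rel (SRel R C) (srel_refl R C) (srel_trans R C)
    intro s' c hcmem
    exact srel_cell heights k R C s' r c hr ((PySem.List.mem_pyRange_one).1 hcmem)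
  rcases hrel.2.2 h with h1 | h2
  · simp at h1
  · exact h2


-- the grid graph both programs explore: 4-adjacency with |Δheight| ≤ k, and reachability
def inb (R C : Int) (p : Int × Int) : Prop := 0 ≤ p.1 ∧ p.1 < R ∧ 0 ≤ p.2 ∧ p.2 < C

def adjP (heights : List (List Int)) (k : Int) (p q : Int × Int) : Prop :=
  inb (heights.length : Int) ((heights.getD 0 []).length : Int) p ∧
  inb (heights.length : Int) ((heights.getD 0 []).length : Int) q ∧
  q ∈ nbrs p.1 p.2 ∧
  |getH heights q.1 q.2 - getH heights p.1 p.2| ≤ k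

def ReachP (heights : List (List Int)) (k : Int) (p : Int × Int) : Prop :=
  Relation.ReflTransGen (adjP heights k) ((0 : Int), (0 : Int)) p

lemma mem_nbrs_symm (p q : Int × Int) (h : q ∈ nbrs p.1 p.2) : p ∈ nbrs q.1 q.2 := by
  simp only [nbrs, List.mem_cons, List.not_mem_nil, or_false, Prod.ext_iff] at h ⊢
  omega

-- ===== B-side: the saturation loop computes exactly the reachable set =====
def SInv (heights : List (List Int)) (k : Int) (reach : PySem.Set (Int × Int)) : Prop :=
  ((0 : Int), (0 : Int)) ∈ reach ∧
  ∀ x ∈ reach, inb (heights.length : Int) ((heights.getD 0 []).length : Int) x ∧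
    ReachP heights k x

lemma sinv_cell (heights : List (List Int)) (k : Int)
    (s : PySem.Set (Int × Int) × Bool) (r c : Int)
    (hr : 0 ≤ r ∧ r < (heights.length : Int))
    (hc : 0 ≤ c ∧ c < ((heights.getD 0 []).length : Int))
    (h : SInv heights k s.1) : SInv heights k (sweepCell heights k s r c).1 := by
  unfold sweepCell
  split_ifs with hcond
  · simp only [Bool.and_eq_true] at hcond
    obtain ⟨p', hp'mem, hp'⟩ := List.any_eq_true.1 hcond.2
    simp only [Bool.and_eq_true, decide_eq_true_eq] at hp'
    have hp'r : p' ∈ s.1 := (PySem.Set.contains_iff _ _).1 hp'.1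
    obtain ⟨hinbp, hreachp⟩ := h.2 p' hp'r
    have hadj : adjP heights k p' (r, c) :=
      ⟨hinbp, ⟨hr.1, hr.2, hc.1, hc.2⟩, mem_nbrs_symm (r, c) p' hp'mem, hp'.2⟩
    constructor
    · exact (PySem.Set.mem_add _ _ _).2 (Or.inl h.1)
    · intro x hx
      rcases (PySem.Set.mem_add _ _ _).1 hx with hx' | rfl
      · exact h.2 x hx'
      · exact ⟨⟨hr.1, hr.2, hc.1, hc.2⟩, Relation.ReflTransGen.tail hreachp hadj⟩
  · exact h

lemma sinv_sweep (heights : List (List Int)) (k : Int) (reach : PySem.Set (Int × Int))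
    (h : SInv heights k reach) :
    SInv heights k
      (sweep heights k (heights.length : Int) ((heights.getD 0 []).length : Int) reach).1 := by
  have hrowstep : ∀ (s : PySem.Set (Int × Int) × Bool) (r : Int),
      r ∈ PySem.List.pyRange 0 (heights.length : Int) 1 →
      SInv heights k s.1 →
      SInv heights k (sweepRow heights k ((heights.getD 0 []).length : Int) s r).1 := by
    intro s r hrmem hs
    unfold sweepRow
    exact foldl_rel
      (fun a b : PySem.Set (Int × Int) × Bool => SInv heights k a.1 → SInv heights k b.1)
      (fun _ hh => hh) (fun _ _ _ h1 h2 h3 => h2 (h1 h3))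
      (fun st c => sweepCell heights k st r c)
      (PySem.List.pyRange 0 ((heights.getD 0 []).length : Int) 1)
      (fun s' c hcmem hs' => sinv_cell heights k s' r c
        ((PySem.List.mem_pyRange_one).1 hrmem) ((PySem.List.mem_pyRange_one).1 hcmem) hs')
      s hs
  unfold sweep
  exact foldl_rel
    (fun a b : PySem.Set (Int × Int) × Bool => SInv heights k a.1 → SInv heights k b.1)
    (fun _ hh => hh) (fun _ _ _ h1 h2 h3 => h2 (h1 h3))
    (sweepRow heights k ((heights.getD 0 []).length : Int))
    (PySem.List.pyRange 0 (heights.length : Int) 1)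
    hrowstep (reach, false) h

lemma foldl_no_change {α β : Type} (f : β × Bool → α → β × Bool) (l : List α)
    (hstep : ∀ s a, (f s a).2 = false → f s a = s) :
    ∀ st, (l.foldl f st).2 = false → l.foldl f st = st ∧ ∀ a ∈ l, f st a = st := by
  induction l with
  | nil => intro st _; exact ⟨rfl, by simp⟩
  | cons a t ih =>
    intro st h
    simp only [List.foldl_cons] at h ⊢
    obtain ⟨h1, h2⟩ := ih (f st a) h
    have hfa : f st a = st := hstep st a (by rw [h1] at h; exact h)
    rw [hfa] at h1 h2
    refine ⟨by rw [hfa]; exact h1, ?_⟩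
    intro b hb
    rcases List.mem_cons.1 hb with rfl | hb'
    · exact hfa
    · exact h2 b hb'

lemma sweepCell_nc (heights : List (List Int)) (k : Int)
    (s : PySem.Set (Int × Int) × Bool) (r c : Int)
    (h : (sweepCell heights k s r c).2 = false) : sweepCell heights k s r c = s := by
  unfold sweepCell at h ⊢
  split_ifs at h ⊢
  rfl

lemma sweep_nc (heights : List (List Int)) (k R C : Int) (reach : PySem.Set (Int × Int))
    (h : (sweep heights k R C reach).2 = false) :
    (sweep heights k R C reach).1 = reach ∧
    ∀ r c : Int, 0 ≤ r → r < R → 0 ≤ c → c < C →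
      sweepCell heights k (reach, false) r c = (reach, false) := by
  have hrow : ∀ (s : PySem.Set (Int × Int) × Bool) (r : Int),
      (sweepRow heights k C s r).2 = false → sweepRow heights k C s r = s := by
    intro s r hh
    exact (foldl_no_change _ _ (fun s' c hc => sweepCell_nc heights k s' r c hc) s hh).1
  obtain ⟨h1, h2⟩ := foldl_no_change (sweepRow heights k C) _
    (fun s r => hrow s r) (reach, false) h
  refine ⟨by unfold sweep; rw [h1], ?_⟩
  intro r c hr1 hr2 hc1 hc2
  have hrmem : r ∈ PySem.List.pyRange 0 R 1 := (PySem.List.mem_pyRange_one).2 ⟨hr1, hr2⟩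
  have hrowfix : sweepRow heights k C (reach, false) r = (reach, false) := h2 r hrmem
  have hin : ((PySem.List.pyRange 0 C 1).foldl
      (fun st c => sweepCell heights k st r c) (reach, false)).2 = false := by
    unfold sweepRow at hrowfix
    rw [hrowfix]
  exact (foldl_no_change (fun st c => sweepCell heights k st r c) _
    (fun s' c' hc' => sweepCell_nc heights k s' r c' hc') (reach, false) hin).2 c
    ((PySem.List.mem_pyRange_one).2 ⟨hc1, hc2⟩)

lemma sweep_closed (heights : List (List Int)) (k : Int) (reach : PySem.Set (Int × Int))
    (h : (sweep heights k (heights.length : Int)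
      ((heights.getD 0 []).length : Int) reach).2 = false) :
    ∀ x y, x ∈ reach → adjP heights k x y → y ∈ reach := by
  intro x y hx hadj
  obtain ⟨y1, y2⟩ := y
  by_contra hy
  obtain ⟨hinbx, hinby, hnb, hht⟩ := hadj
  have hcell := (sweep_nc heights k _ _ reach h).2 y1 y2
    hinby.1 hinby.2.1 hinby.2.2.1 hinby.2.2.2
  unfold sweepCell at hcell
  split_ifs at hcell with hcond
  · exact Bool.noConfusion (congrArg Prod.snd hcell)
  · apply hcond
    rw [Bool.and_eq_true]
    constructor
    · rw [Bool.not_eq_true']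
      exact Bool.eq_false_iff.mpr (fun hc => hy ((PySem.Set.contains_iff _ _).1 hc))
    · apply List.any_eq_true.2
      refine ⟨x, mem_nbrs_symm x (y1, y2) hnb, ?_⟩
      rw [Bool.and_eq_true]
      exact ⟨(PySem.Set.contains_iff _ _).2 hx, decide_eq_true hht⟩

lemma fixLoop_spec (heights : List (List Int)) (k : Int) : ∀ (fuel : Nat)
    (reach : PySem.Set (Int × Int)),
    missing (heights.length : Int) ((heights.getD 0 []).length : Int) reach < fuel →
    SInv heights k reach →
    SInv heights k (fixLoop heights k (heights.length : Int)
      ((heights.getD 0 []).length : Int) fuel reach) ∧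
    (∀ x y, x ∈ fixLoop heights k (heights.length : Int)
        ((heights.getD 0 []).length : Int) fuel reach → adjP heights k x y →
      y ∈ fixLoop heights k (heights.length : Int)
        ((heights.getD 0 []).length : Int) fuel reach) := by
  intro fuel
  induction fuel with
  | zero => intro reach hf _; exact absurd hf (Nat.not_lt_zero _)
  | succ fuel ih =>
    intro reach hfuel hs
    rw [fixLoop]
    split_ifs with hch
    · refine ih _ ?_ (sinv_sweep heights k reach hs)
      have := sweep_measure heights k _ _ reach hch
      omega
    · have hfalse : (sweep heights k (heights.length : Int)
          ((heights.getD 0 []).length : Int) reach).2 = false :=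
        Bool.not_eq_true _ ▸ eq_false_of_ne_true hch
      rw [(sweep_nc heights k _ _ reach hfalse).1]
      exact ⟨hs, sweep_closed heights k reach hfalse⟩

lemma alt_iff (heights : List (List Int)) (k : Int) (hpre : Pre_isPassable heights k) :
    (isPassable_alt heights k = true ↔
      ReachP heights k
        ((heights.length : Int) - 1, ((heights.getD 0 []).length : Int) - 1)) := by
  have hR : 0 < heights.length := List.length_pos_of_ne_nil hpre.1
  have hC : 0 < (heights.getD 0 []).length := List.length_pos_of_ne_nil hpre.2.1
  have hs0 : SInv heights k (PySem.Set.ofList [((0 : Int), (0 : Int))]) := by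
    constructor
    · exact (PySem.Set.mem_ofList _ _).2 (by simp)
    · intro x hx
      have hx0 : x = ((0 : Int), (0 : Int)) := by
        simpa using (PySem.Set.mem_ofList _ _).1 hx
      subst hx0
      refine ⟨⟨le_refl 0, ?_, le_refl 0, ?_⟩, Relation.ReflTransGen.refl⟩
      · show (0 : Int) < (heights.length : Int)
        exact_mod_cast hR
      · show (0 : Int) < ((heights.getD 0 []).length : Int)
        exact_mod_cast hC
  obtain ⟨hsF, hclosed⟩ := fixLoop_spec heights k
    (missing (heights.length : Int) ((heights.getD 0 []).length : Int)
      (PySem.Set.ofList [((0 : Int), (0 : Int))]) + 1)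
    (PySem.Set.ofList [((0 : Int), (0 : Int))]) (Nat.lt_succ_self _) hs0
  have hmemF : ∀ p, ReachP heights k p →
      p ∈ fixLoop heights k (heights.length : Int) ((heights.getD 0 []).length : Int)
        (missing (heights.length : Int) ((heights.getD 0 []).length : Int)
          (PySem.Set.ofList [((0 : Int), (0 : Int))]) + 1)
        (PySem.Set.ofList [((0 : Int), (0 : Int))]) := by
    intro p hp
    induction hp with
    | refl => exact hsF.1
    | tail h1 h2 ih => exact hclosed _ _ ih h2
  unfold isPassable_alt
  rw [PySem.Set.contains_iff]
  exact ⟨fun ht => (hsF.2 _ ht).2, fun hreach => hmemF _ hreach⟩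

-- ===== A-side: BFS computes exactly the reachable set =====
def Dims (heights : List (List Int)) (check : List (List Bool)) : Prop :=
  check.length = heights.length ∧ ∀ row ∈ check, row.length = (heights.getD 0 []).length

lemma getD_set {α : Type} (l : List α) (i j : Nat) (a d : α) :
    (l.set i a).getD j d = if i = j ∧ i < l.length then a else l.getD j d := by
  induction l generalizing i j with
  | nil => simp
  | cons b t ih =>
    cases i with
    | zero => cases j <;> simp
    | succ i =>
      cases j with
      | zero => simp
      | succ j =>
        simp only [List.set_cons_succ, List.getD_cons_succ, List.length_cons]
        rw [ih i j]
        by_cases hc : i = j ∧ i < t.length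
        · rw [if_pos hc, if_pos (by omega)]
        · rw [if_neg hc, if_neg (by omega)]

lemma getB_setB_mono (check : List (List Bool)) (r c x y : Int)
    (h : getB check x y = true) : getB (setB check r c) x y = true := by
  unfold getB setB at *
  rw [getD_set]
  split_ifs with hc
  · rw [getD_set]
    split_ifs with hc2
    · rfl
    · rw [hc.1]; exact h
  · exact h

lemma getB_setB_self (check : List (List Bool)) (r c : Int)
    (h : inDims check r c = true) : getB (setB check r c) r c = true := by
  unfold inDims at h
  simp only [Bool.and_eq_true, decide_eq_true_eq] at h
  unfold getB setB
  rw [getD_set, if_pos ⟨rfl, h.1⟩, getD_set, if_pos ⟨rfl, h.2⟩]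

lemma getB_setB_cases (check : List (List Bool)) (r c x y : Int)
    (h : getB (setB check r c) x y = true) :
    getB check x y = true ∨ (x.toNat = r.toNat ∧ y.toNat = c.toNat) := by
  unfold getB setB at *
  rw [getD_set] at h
  split_ifs at h with hc
  · rw [getD_set] at h
    split_ifs at h with hc2
    · exact Or.inr ⟨hc.1.symm, hc2.1.symm⟩
    · exact Or.inl (by rw [← hc.1]; exact h)
  · exact Or.inl h

lemma getD_replicate' {α : Type} (n : Nat) (a d : α) (i : Nat) :
    (List.replicate n a).getD i d = if i < n then a else d := by
  rw [List.getD_eq_getElem?_getD, List.getElem?_replicate]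
  split_ifs <;> rfl

lemma getB_blank (R C : Nat) (x y : Int) :
    getB (List.replicate R (List.replicate C false)) x y = false := by
  unfold getB
  rw [getD_replicate']
  split_ifs
  · rw [getD_replicate']
    split_ifs <;> rfl
  · rfl

lemma dims_setB (heights : List (List Int)) (check : List (List Bool)) (r c : Int)
    (h : Dims heights check) : Dims heights (setB check r c) := by
  by_cases hin : r.toNat < check.length
  · refine ⟨by simp [setB, h.1], ?_⟩
    intro row hrow
    rcases List.mem_or_eq_of_mem_set hrow with h1 | h1
    · exact h.2 row h1
    · subst h1
      rw [List.length_set]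
      exact h.2 _ (by rw [List.getD_eq_getElem _ _ hin]; exact List.getElem_mem _)
  · unfold setB
    rw [List.set_eq_of_length_le (by omega)]
    exact h

lemma dims_init (heights : List (List Int)) :
    Dims heights (setB (List.replicate heights.length
      (List.replicate (heights.getD 0 []).length false)) 0 0) := by
  apply dims_setB
  refine ⟨by simp, ?_⟩
  intro row hrow
  rw [List.eq_of_mem_replicate hrow]
  simp

lemma inDims_of (heights : List (List Int)) (check : List (List Bool))
    (h : Dims heights check) (r c : Int) (hr : 0 ≤ r) (hrlt : r < (heights.length : Int))
    (hc : 0 ≤ c) (hclt : c < ((heights.getD 0 []).length : Int)) :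
    inDims check r c = true := by
  unfold inDims
  have h1 : r.toNat < check.length := by rw [h.1]; omega
  have hrow : (check.getD r.toNat []) ∈ check := by
    rw [List.getD_eq_getElem _ _ h1]; exact List.getElem_mem _
  have h2 : c.toNat < (check.getD r.toNat []).length := by rw [h.2 _ hrow]; omega
  rw [Bool.and_eq_true]
  exact ⟨decide_eq_true h1, decide_eq_true h2⟩

lemma mem_nbrs_iff_dirs (p q : Int × Int) :
    q ∈ nbrs p.1 p.2 ↔ ∃ d ∈ dirs, q = (p.1 + d.1, p.2 + d.2) := by
  constructor
  · intro h
    rcases (by simpa [nbrs] using h : q = (p.1 - 1, p.2) ∨ q = (p.1 + 1, p.2) ∨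
        q = (p.1, p.2 - 1) ∨ q = (p.1, p.2 + 1)) with h1 | h1 | h1 | h1
    · exact ⟨(-1, 0), by simp [dirs], by rw [h1]; exact Prod.ext (by omega) (by norm_num)⟩
    · exact ⟨(1, 0), by simp [dirs], by rw [h1]; exact Prod.ext (by norm_num) (by norm_num)⟩
    · exact ⟨(0, -1), by simp [dirs], by rw [h1]; exact Prod.ext (by norm_num) (by omega)⟩
    · exact ⟨(0, 1), by simp [dirs], by rw [h1]; exact Prod.ext (by norm_num) (by norm_num)⟩
  · rintro ⟨d, hd, rfl⟩
    rcases (by simpa [dirs] using hd : d = ((1 : Int), (0 : Int)) ∨ d = (-1, 0) ∨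
        d = (0, 1) ∨ d = (0, -1)) with h1 | h1 | h1 | h1 <;> subst h1 <;>
      simp [nbrs, Prod.ext_iff] <;> omega

-- the BFS loop invariant
structure AInv (heights : List (List Int)) (k : Int)
    (check : List (List Bool)) (q : List (Int × Int)) : Prop where
  dims : Dims heights check
  start : getB check 0 0 = true
  qmem : ∀ p ∈ q, inb (heights.length : Int) ((heights.getD 0 []).length : Int) p ∧
    getB check p.1 p.2 = true
  sound : ∀ x, inb (heights.length : Int) ((heights.getD 0 []).length : Int) x →
    getB check x.1 x.2 = true → ReachP heights k x
  closed : ∀ x, inb (heights.length : Int) ((heights.getD 0 []).length : Int) x →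
    getB check x.1 x.2 = true → x ∉ q →
    ∀ y, adjP heights k x y → getB check y.1 y.2 = true
  target : getB check ((heights.length : Int) - 1)
      (((heights.getD 0 []).length : Int) - 1) = true →
    ((heights.length : Int) - 1, ((heights.getD 0 []).length : Int) - 1) ∈ q

-- what one pass of the inner 'for d in range(4)' fold establishes
lemma fold_relax_spec (heights : List (List Int)) (k : Int) (p : Int × Int)
    (hp : inb (heights.length : Int) ((heights.getD 0 []).length : Int) p)
    (check0 : List (List Bool)) (rest : List (Int × Int)) :
    ∀ (ds : List (Int × Int)) (st : List (List Bool) × List (Int × Int)),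
    (∀ d ∈ ds, d ∈ dirs) →
    Dims heights st.1 →
    (∀ x : Int × Int, getB check0 x.1 x.2 = true → getB st.1 x.1 x.2 = true) →
    (∀ x, inb (heights.length : Int) ((heights.getD 0 []).length : Int) x →
      getB st.1 x.1 x.2 = true →
      getB check0 x.1 x.2 = true ∨ (adjP heights k p x ∧ x ∈ st.2)) →
    (∀ x ∈ st.2, x ∈ rest ∨ (adjP heights k p x ∧ getB st.1 x.1 x.2 = true)) →
    (∀ x ∈ rest, x ∈ st.2) →
    (Dims heights (ds.foldl (relax heights (heights.length : Int)
        ((heights.getD 0 []).length : Int) k p.1 p.2) st).1 ∧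
     (∀ x : Int × Int, getB check0 x.1 x.2 = true →
       getB (ds.foldl (relax heights (heights.length : Int)
        ((heights.getD 0 []).length : Int) k p.1 p.2) st).1 x.1 x.2 = true) ∧
     (∀ x, inb (heights.length : Int) ((heights.getD 0 []).length : Int) x →
       getB (ds.foldl (relax heights (heights.length : Int)
        ((heights.getD 0 []).length : Int) k p.1 p.2) st).1 x.1 x.2 = true →
       getB check0 x.1 x.2 = true ∨ (adjP heights k p x ∧
         x ∈ (ds.foldl (relax heights (heights.length : Int)
          ((heights.getD 0 []).length : Int) k p.1 p.2) st).2)) ∧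
     (∀ x ∈ (ds.foldl (relax heights (heights.length : Int)
        ((heights.getD 0 []).length : Int) k p.1 p.2) st).2,
       x ∈ rest ∨ (adjP heights k p x ∧
         getB (ds.foldl (relax heights (heights.length : Int)
          ((heights.getD 0 []).length : Int) k p.1 p.2) st).1 x.1 x.2 = true)) ∧
     (∀ x ∈ rest, x ∈ (ds.foldl (relax heights (heights.length : Int)
        ((heights.getD 0 []).length : Int) k p.1 p.2) st).2) ∧
     (∀ x : Int × Int, getB st.1 x.1 x.2 = true →
       getB (ds.foldl (relax heights (heights.length : Int)
        ((heights.getD 0 []).length : Int) k p.1 p.2) st).1 x.1 x.2 = true) ∧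
     (∀ d ∈ ds, inb (heights.length : Int) ((heights.getD 0 []).length : Int)
         (p.1 + d.1, p.2 + d.2) →
       |getH heights (p.1 + d.1) (p.2 + d.2) - getH heights p.1 p.2| ≤ k →
       getB (ds.foldl (relax heights (heights.length : Int)
        ((heights.getD 0 []).length : Int) k p.1 p.2) st).1 (p.1 + d.1) (p.2 + d.2) = true)) := by
  intro ds
  induction ds with
  | nil =>
    intro st _ h1 h2 h3 h4 h5
    exact ⟨h1, h2, h3, h4, h5, fun x hx => hx, fun d hd => absurd hd List.not_mem_nil⟩
  | cons d ds ih =>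
    intro st hds h1 h2 h3 h4 h5
    simp only [List.foldl_cons]
    -- analyse one relax step
    have hdd : d ∈ dirs := hds d (List.mem_cons_self ..)
    by_cases hoob : p.1 + d.1 < 0 ∨ p.2 + d.2 < 0 ∨ (heights.length : Int) ≤ p.1 + d.1 ∨
        ((heights.getD 0 []).length : Int) ≤ p.2 + d.2
    · -- out of bounds: state unchanged
      have hstep : relax heights (heights.length : Int) ((heights.getD 0 []).length : Int)
          k p.1 p.2 st d = st := by
        unfold relax
        rw [if_pos hoob]
      rw [hstep]
      obtain ⟨c1, c2, c3, c4, c5, c6, c7⟩ :=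
        ih st (fun d' hd' => hds d' (List.mem_cons_of_mem _ hd')) h1 h2 h3 h4 h5
      refine ⟨c1, c2, c3, c4, c5, c6, ?_⟩
      intro d' hd' hinb hht
      rcases List.mem_cons.1 hd' with rfl | hd''
      · exact absurd hoob (by obtain ⟨a1, a2, a3, a4⟩ := hinb; push_neg; exact ⟨a1, a3, by omega, by omega⟩)
      · exact c7 d' hd'' hinb hht
    · by_cases hskip : (getB st.1 (p.1 + d.1) (p.2 + d.2)
          || decide (k < |getH heights (p.1 + d.1) (p.2 + d.2) - getH heights p.1 p.2|)) = true
      · -- already visited or too steep: state unchanged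
        have hstep : relax heights (heights.length : Int) ((heights.getD 0 []).length : Int)
            k p.1 p.2 st d = st := by
          unfold relax
          rw [if_neg hoob, if_pos hskip]
        rw [hstep]
        obtain ⟨c1, c2, c3, c4, c5, c6, c7⟩ :=
          ih st (fun d' hd' => hds d' (List.mem_cons_of_mem _ hd')) h1 h2 h3 h4 h5
        refine ⟨c1, c2, c3, c4, c5, c6, ?_⟩
        intro d' hd' hinb hht
        rcases List.mem_cons.1 hd' with rfl | hd''
        · -- skip was due to the cell being already marked
          have hmk : getB st.1 (p.1 + d'.1) (p.2 + d'.2) = true := by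
            rcases (Bool.or_eq_true _ _) ▸ hskip with h | h
            · exact h
            · exact absurd (of_decide_eq_true h) (not_lt.2 hht)
          exact c6 (p.1 + d'.1, p.2 + d'.2) hmk
        · exact c7 d' hd'' hinb hht
      · -- new cell: mark it and append it
        have hinbn : inb (heights.length : Int) ((heights.getD 0 []).length : Int)
            (p.1 + d.1, p.2 + d.2) := by
          push_neg at hoob
          exact ⟨by omega, by omega, by omega, by omega⟩
        have hmkf : getB st.1 (p.1 + d.1) (p.2 + d.2) = false := by
          rcases Bool.or_eq_false_iff.1 (Bool.eq_false_iff.2 hskip) with ⟨ha, _⟩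
          exact ha
        have hhtok : |getH heights (p.1 + d.1) (p.2 + d.2) - getH heights p.1 p.2| ≤ k := by
          rcases Bool.or_eq_false_iff.1 (Bool.eq_false_iff.2 hskip) with ⟨_, hb⟩
          simpa using hb
        have hdim : inDims st.1 (p.1 + d.1) (p.2 + d.2) = true :=
          inDims_of heights st.1 h1 _ _ hinbn.1 hinbn.2.1 hinbn.2.2.1 hinbn.2.2.2
        have hstep : relax heights (heights.length : Int) ((heights.getD 0 []).length : Int)
            k p.1 p.2 st d
            = (setB st.1 (p.1 + d.1) (p.2 + d.2), st.2 ++ [(p.1 + d.1, p.2 + d.2)]) := by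
          unfold relax
          rw [if_neg hoob, if_neg hskip, if_pos hdim]
        rw [hstep]
        have hadj : adjP heights k p (p.1 + d.1, p.2 + d.2) :=
          ⟨hp, hinbn, (mem_nbrs_iff_dirs p _).2 ⟨d, hdd, rfl⟩, hhtok⟩
        -- the new state satisfies the hypotheses
        have n1 : Dims heights (setB st.1 (p.1 + d.1) (p.2 + d.2)) := dims_setB _ _ _ _ h1
        have n2 : ∀ x : Int × Int, getB check0 x.1 x.2 = true →
            getB (setB st.1 (p.1 + d.1) (p.2 + d.2)) x.1 x.2 = true :=
          fun x hx => getB_setB_mono _ _ _ _ _ (h2 x hx)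
        have n3 : ∀ x, inb (heights.length : Int) ((heights.getD 0 []).length : Int) x →
            getB (setB st.1 (p.1 + d.1) (p.2 + d.2)) x.1 x.2 = true →
            getB check0 x.1 x.2 = true ∨ (adjP heights k p x ∧
              x ∈ st.2 ++ [(p.1 + d.1, p.2 + d.2)]) := by
          intro x hinbx hmk
          rcases getB_setB_cases _ _ _ _ _ hmk with hold | ⟨he1, he2⟩
          · rcases h3 x hinbx hold with ha | ⟨ha, hb⟩
            · exact Or.inl ha
            · exact Or.inr ⟨ha, List.mem_append_left _ hb⟩
          · have hxeq : x = (p.1 + d.1, p.2 + d.2) := by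
              obtain ⟨b1, b2, b3, b4⟩ := hinbx
              obtain ⟨e1, e2, e3, e4⟩ := hinbn
              have : x.1 = p.1 + d.1 := by omega
              have : x.2 = p.2 + d.2 := by omega
              exact Prod.ext (by omega) (by omega)
            subst hxeq
            exact Or.inr ⟨hadj, List.mem_append_right _ (List.mem_singleton.2 rfl)⟩
        have n4 : ∀ x ∈ st.2 ++ [(p.1 + d.1, p.2 + d.2)],
            x ∈ rest ∨ (adjP heights k p x ∧
              getB (setB st.1 (p.1 + d.1) (p.2 + d.2)) x.1 x.2 = true) := by
          intro x hx
          rcases List.mem_append.1 hx with hx' | hx'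
          · rcases h4 x hx' with ha | ⟨ha, hb⟩
            · exact Or.inl ha
            · exact Or.inr ⟨ha, getB_setB_mono _ _ _ _ _ hb⟩
          · rw [List.mem_singleton.1 hx']
            exact Or.inr ⟨hadj, getB_setB_self _ _ _ hdim⟩
        have n5 : ∀ x ∈ rest, x ∈ st.2 ++ [(p.1 + d.1, p.2 + d.2)] :=
          fun x hx => List.mem_append_left _ (h5 x hx)
        obtain ⟨c1, c2, c3, c4, c5, c6, c7⟩ :=
          ih (setB st.1 (p.1 + d.1) (p.2 + d.2), st.2 ++ [(p.1 + d.1, p.2 + d.2)])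
            (fun d' hd' => hds d' (List.mem_cons_of_mem _ hd')) n1 n2 n3 n4 n5
        refine ⟨c1, c2, c3, c4, c5,
          fun x hx => c6 x (getB_setB_mono _ _ _ _ _ hx), ?_⟩
        intro d' hd' hinb' hht'
        rcases List.mem_cons.1 hd' with rfl | hd''
        · exact c6 (p.1 + d'.1, p.2 + d'.2) (getB_setB_self _ _ _ hdim)
        · exact c7 d' hd'' hinb' hht'

lemma bfsLoop_iff (heights : List (List Int)) (k : Int)
    (hR : 0 < heights.length) (hC : 0 < (heights.getD 0 []).length) :
    ∀ (fuel : Nat) (check : List (List Bool)) (q : List (Int × Int)),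
    countFalse check + q.length < fuel → AInv heights k check q →
    (bfsLoop heights (heights.length : Int) ((heights.getD 0 []).length : Int) k
        fuel check q = true ↔
      ReachP heights k ((heights.length : Int) - 1,
        ((heights.getD 0 []).length : Int) - 1)) := by
  intro fuel
  induction fuel with
  | zero => intro check q hf _; exact absurd hf (by omega)
  | succ fuel ih =>
    intro check q hfuel inv
    cases q with
    | nil =>
      rw [bfsLoop]
      constructor
      · intro h; exact Bool.noConfusion h
      · intro hreach
        exfalso
        have hmark : ∀ x, ReachP heights k x → getB check x.1 x.2 = true := by
          intro x hx
          induction hx with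
          | refl => exact inv.start
          | tail h1 h2 ihh =>
            exact inv.closed _ h2.1 ihh List.not_mem_nil _ h2
        exact absurd (inv.target (hmark _ hreach)) List.not_mem_nil
    | cons p rest =>
      rw [bfsLoop]
      split_ifs with htgt
      · constructor
        · intro _
          obtain ⟨hpinb, hpmark⟩ := inv.qmem p (List.mem_cons_self ..)
          have hpt : ((heights.length : Int) - 1,
              ((heights.getD 0 []).length : Int) - 1) = p :=
            Prod.ext htgt.1.symm htgt.2.symm
          rw [hpt]
          exact inv.sound p hpinb hpmark
        · intro _; rfl
      · obtain ⟨hpinb, hpmark⟩ := inv.qmem p (List.mem_cons_self ..)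
        obtain ⟨c1, c2, c3, c4, c5, c6, c7⟩ :=
          fold_relax_spec heights k p hpinb check rest dirs (check, rest)
            (fun d hd => hd) inv.dims (fun x hx => hx)
            (fun x hinbx hmk => Or.inl hmk)
            (fun x hx => Or.inl hx)
            (fun x hx => hx)
        have htinb : inb (heights.length : Int) ((heights.getD 0 []).length : Int)
            ((heights.length : Int) - 1, ((heights.getD 0 []).length : Int) - 1) := by
          refine ⟨?_, ?_, ?_, ?_⟩
          · show (0 : Int) ≤ (heights.length : Int) - 1
            omega
          · show (heights.length : Int) - 1 < (heights.length : Int)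
            omega
          · show (0 : Int) ≤ ((heights.getD 0 []).length : Int) - 1
            omega
          · show ((heights.getD 0 []).length : Int) - 1 < ((heights.getD 0 []).length : Int)
            omega
        have inv' : AInv heights k
            (dirs.foldl (relax heights (heights.length : Int)
              ((heights.getD 0 []).length : Int) k p.1 p.2) (check, rest)).1
            (dirs.foldl (relax heights (heights.length : Int)
              ((heights.getD 0 []).length : Int) k p.1 p.2) (check, rest)).2 := by
          refine ⟨c1, c2 (0, 0) inv.start, ?_, ?_, ?_, ?_⟩
          · intro x hx
            rcases c4 x hx with hr | ⟨hadj, hmk⟩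
            · obtain ⟨ha, hb⟩ := inv.qmem x (List.mem_cons_of_mem _ hr)
              exact ⟨ha, c2 x hb⟩
            · exact ⟨hadj.2.1, hmk⟩
          · intro x hinbx hmk
            rcases c3 x hinbx hmk with hold | ⟨hadj, _⟩
            · exact inv.sound x hinbx hold
            · exact (inv.sound p hpinb hpmark).tail hadj
          · intro x hinbx hmk hnin y hadjxy
            by_cases hxp : x = p
            · subst hxp
              obtain ⟨d, hd, hyeq⟩ := (mem_nbrs_iff_dirs x y).1 hadjxy.2.2.1
              rw [hyeq]
              exact c7 d hd (hyeq ▸ hadjxy.2.1) (by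
                have := hadjxy.2.2.2
                rw [hyeq] at this
                exact this)
            · rcases c3 x hinbx hmk with hold | ⟨_, hin⟩
              · have hxnotq : x ∉ p :: rest := by
                  intro hmem
                  rcases List.mem_cons.1 hmem with rfl | hr
                  · exact hxp rfl
                  · exact hnin (c5 x hr)
                exact c2 y (inv.closed x hinbx hold hxnotq y hadjxy)
              · exact absurd hin hnin
          · intro hmk
            rcases c3 _ htinb hmk with hold | ⟨_, hin⟩
            · rcases List.mem_cons.1 (inv.target hold) with heq | hr
              · exact absurd ⟨congrArg Prod.fst heq.symm, congrArg Prod.snd heq.symm⟩ htgt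
              · exact c5 _ hr
            · exact hin
        have hm := foldl_relax_measure heights (heights.length : Int)
          ((heights.getD 0 []).length : Int) k p.1 p.2 dirs (check, rest)
        refine ih _ _ ?_ inv'
        have hm' : countFalse (dirs.foldl (relax heights (heights.length : Int)
              ((heights.getD 0 []).length : Int) k p.1 p.2) (check, rest)).1
            + (dirs.foldl (relax heights (heights.length : Int)
              ((heights.getD 0 []).length : Int) k p.1 p.2) (check, rest)).2.length
            = countFalse check + rest.length := hm
        simp only [List.length_cons] at hfuel
        omega

lemma isPassable_iff (heights : List (List Int)) (k : Int)
    (hpre : Pre_isPassable heights k) :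
    (isPassable heights k = true ↔
      ReachP heights k ((heights.length : Int) - 1,
        ((heights.getD 0 []).length : Int) - 1)) := by
  have hR : 0 < heights.length := List.length_pos_of_ne_nil hpre.1
  have hC : 0 < (heights.getD 0 []).length := List.length_pos_of_ne_nil hpre.2.1
  have hdims0 : Dims heights (setB (List.replicate heights.length
      (List.replicate (heights.getD 0 []).length false)) 0 0) := dims_init heights
  have hdimsblank : Dims heights (List.replicate heights.length
      (List.replicate (heights.getD 0 []).length false)) := by
    refine ⟨by simp, ?_⟩
    intro row hrow
    rw [List.eq_of_mem_replicate hrow]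
    simp
  have hin00 : inDims (List.replicate heights.length
      (List.replicate (heights.getD 0 []).length false)) 0 0 = true :=
    inDims_of heights _ hdimsblank 0 0 (le_refl 0) (by exact_mod_cast hR)
      (le_refl 0) (by exact_mod_cast hC)
  have hstart : getB (setB (List.replicate heights.length
      (List.replicate (heights.getD 0 []).length false)) 0 0) 0 0 = true :=
    getB_setB_self _ 0 0 hin00
  have honly : ∀ x : Int × Int, 0 ≤ x.1 → 0 ≤ x.2 →
      getB (setB (List.replicate heights.length
        (List.replicate (heights.getD 0 []).length false)) 0 0) x.1 x.2 = true →
      x = ((0 : Int), (0 : Int)) := by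
    intro x hx1 hx2 hmk
    rcases getB_setB_cases _ _ _ _ _ hmk with hold | ⟨he1, he2⟩
    · rw [getB_blank] at hold
      exact Bool.noConfusion hold
    · exact Prod.ext (by omega) (by omega)
  have hinv : AInv heights k
      (setB (List.replicate heights.length
        (List.replicate (heights.getD 0 []).length false)) 0 0)
      [((0 : Int), (0 : Int))] := by
    refine ⟨hdims0, hstart, ?_, ?_, ?_, ?_⟩
    · intro x hx
      rw [List.mem_singleton.1 hx]
      refine ⟨⟨le_refl 0, ?_, le_refl 0, ?_⟩, hstart⟩
      · show (0 : Int) < (heights.length : Int)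
        exact_mod_cast hR
      · show (0 : Int) < ((heights.getD 0 []).length : Int)
        exact_mod_cast hC
    · intro x hinbx hmk
      rw [honly x hinbx.1 hinbx.2.2.1 hmk]
      exact Relation.ReflTransGen.refl
    · intro x hinbx hmk hnin
      exact absurd (by rw [honly x hinbx.1 hinbx.2.2.1 hmk]; exact List.mem_singleton.2 rfl) hnin
    · intro hmk
      have := honly ((heights.length : Int) - 1, ((heights.getD 0 []).length : Int) - 1)
        (show (0 : Int) ≤ (heights.length : Int) - 1 by omega)
        (show (0 : Int) ≤ ((heights.getD 0 []).length : Int) - 1 by omega) hmk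
      rw [this]
      exact List.mem_singleton.2 rfl
  unfold isPassable
  exact bfsLoop_iff heights k hR hC _ _ _ (by simp) hinv

-- ===== VERDICT (by name: the statement is the Claim_ definition above) =====
theorem isPassable_spec : Claim_equal_isPassable := by
  intro heights k _ hpre
  unfold Spec_isPassable
  have h1 := isPassable_iff heights k hpre
  have h2 := alt_iff heights k hpre
  have h3 : (isPassable heights k = true) ↔ (isPassable_alt heights k = true) :=
    h1.trans h2.symm
  cases hA : isPassable heights k
  · cases hB : isPassable_alt heights k
    · rfl
    · rw [hA, hB] at h3; exact absurd (h3.2 rfl) (by simp)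
  · cases hB : isPassable_alt heights k
    · rw [hA, hB] at h3; exact absurd (h3.1 rfl) (by simp)
    · rfl
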